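-- pv_equiv track=rewrite | github.com/pedrohft/python-coding | codesignal/1.py | solution
-- ===== SOURCE A (Python) =====
-- def solution(numbers, left, right):
--     arr = [False]*len(numbers)
--
--     for i in range(len(numbers)):
--
--         for j in range(left, right+1):
--             r = (i + 1) * j
--             if (r == numbers[i]):
--                 arr[i] = True
--
--     return arr
-- ===== SOURCE B (Python) =====
-- def solution(numbers, left, right):
--     return [n % (i + 1) == 0 and left <= n // (i + 1) <= right
--             for i, n in enumerate(numbers)]
-- ===== Notes on version B (the rewrite author's own statement) =====
-- stated objective: alternative
-- what changed: replaces the inner scan over every j in [left,right] by a single divisibility-and-bounds check numbers[i] % (i+1) == 0 and left <= numbers[i]//(i+1) <= right per index, one comprehension pass over the list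
import Mathlib
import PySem

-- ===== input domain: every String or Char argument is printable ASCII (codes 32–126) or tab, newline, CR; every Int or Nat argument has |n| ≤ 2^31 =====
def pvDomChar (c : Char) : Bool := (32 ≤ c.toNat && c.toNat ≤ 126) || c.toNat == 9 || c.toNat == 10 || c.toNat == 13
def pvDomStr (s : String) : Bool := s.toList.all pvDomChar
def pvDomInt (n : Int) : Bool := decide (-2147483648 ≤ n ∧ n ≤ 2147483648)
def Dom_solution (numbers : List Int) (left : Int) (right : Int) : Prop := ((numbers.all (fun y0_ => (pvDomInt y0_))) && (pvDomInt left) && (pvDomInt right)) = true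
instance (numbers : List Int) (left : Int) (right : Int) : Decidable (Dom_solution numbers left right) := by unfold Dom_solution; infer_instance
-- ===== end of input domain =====

-- B replaces A's inner scan over j in [left, right] by one divisibility-and-bounds check per index.

-- ===== PORT A =====
def solution (numbers : List Int) (left : Int) (right : Int) : List Bool :=
  let arr := List.replicate numbers.length false
  (List.range numbers.length).foldl (fun arr (i : Nat) =>
    (PySem.List.pyRange left (right + 1) 1).foldl (fun arr j =>
      let r := ((i : Int) + 1) * j
      if some r = PySem.List.pyGet? numbers (i : Int) then PySem.List.pySetD arr (i : Int) true
      else arr) arr) arr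

-- ===== PORT B =====
def solution_alt (numbers : List Int) (left : Int) (right : Int) : List Bool :=
  (PySem.List.enumerate numbers 0).map (fun p =>
    decide (PySem.Int.mod p.2 (p.1 + 1) = 0) &&
      (decide (left ≤ PySem.Int.floordiv p.2 (p.1 + 1)) &&
       decide (PySem.Int.floordiv p.2 (p.1 + 1) ≤ right)))

-- ===== PRECONDITION & SPEC =====
def Spec_solution (numbers : List Int) (left : Int) (right : Int) (out : List Bool) : Prop := out = solution_alt numbers left right
instance (numbers : List Int) (left : Int) (right : Int) (out : List Bool) : Decidable (Spec_solution numbers left right out) := by unfold Spec_solution; infer_instance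

-- ===== CLAIM (what is proved, stated in full; the proofs are below) =====
def Claim_equal_solution : Prop := ∀ (numbers : List Int) (left : Int) (right : Int), Dom_solution numbers left right → Spec_solution numbers left right (solution numbers left right)

-- ===== LEMMAS AND PROOFS =====

-- A's inner loop over one index either leaves arr unchanged or sets index i to True.
lemma inner_fold (numbers : List Int) (i : Nat) (js : List Int) (arr : List Bool) :
    js.foldl (fun arr j =>
        if some (((i : Int) + 1) * j) = PySem.List.pyGet? numbers (i : Int) then PySem.List.pySetD arr (i : Int) true
        else arr) arr
      = if js.any (fun j => decide (some (((i : Int) + 1) * j) = PySem.List.pyGet? numbers (i : Int)))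
        then arr.set i true else arr := by
  induction js generalizing arr with
  | nil => simp
  | cons j js ih =>
    rw [List.foldl_cons, List.any_cons]
    by_cases h : some (((i : Int) + 1) * j) = PySem.List.pyGet? numbers (i : Int)
    · rw [if_pos h, PySem.List.pySetD_natCast, ih]
      simp [h, List.set_set]
    · rw [if_neg h, ih]
      rw [PySem.List.pyGet?_natCast] at h
      simp [h]

-- setting slot m of a list whose first m entries are fixed inserts the flag between them
lemma set_mid (X R : List Bool) (b : Bool) (m : Nat) (hX : X.length = m) :
    (if b = true then (X ++ false :: R).set m true else (X ++ false :: R)) = X ++ b :: R := by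
  cases b
  · simp
  · rw [if_pos rfl, ← hX, List.set_append_right _ _ (le_refl _)]
    simp

-- the per-index condition A computes
def condA (numbers : List Int) (left right : Int) (i : Nat) : Bool :=
  (PySem.List.pyRange left (right + 1) 1).any
    (fun j => decide (some (((i : Int) + 1) * j) = PySem.List.pyGet? numbers (i : Int)))

-- A's outer loop builds the list of condA values index by index.
lemma outer_fold (numbers : List Int) (left right : Int) :
    ∀ m, m ≤ numbers.length →
      (List.range m).foldl (fun arr (i : Nat) =>
          (PySem.List.pyRange left (right + 1) 1).foldl (fun arr j =>
            if some (((i : Int) + 1) * j) = PySem.List.pyGet? numbers (i : Int) then PySem.List.pySetD arr (i : Int) true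
            else arr) arr) (List.replicate numbers.length false)
        = (List.range m).map (condA numbers left right)
            ++ List.replicate (numbers.length - m) false := by
  intro m hm
  induction m with
  | zero => simp
  | succ m ih =>
    have hm' : m ≤ numbers.length := Nat.le_of_succ_le hm
    rw [List.range_succ, List.foldl_append, List.foldl_cons, List.foldl_nil, ih hm',
        inner_fold]
    have hlen : ((List.range m).map (condA numbers left right)).length = m := by simp
    have hrep : List.replicate (numbers.length - m) false
        = false :: List.replicate (numbers.length - (m + 1)) false := by
      have : numbers.length - m = (numbers.length - (m + 1)) + 1 := by omega
      rw [this, List.replicate_succ]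
    rw [hrep, List.map_append]
    simp only [List.map_cons, List.map_nil, List.append_assoc, List.cons_append, List.nil_append]
    exact set_mid _ _ (condA numbers left right m) m hlen

-- the divisibility check agrees with scanning all multipliers in [left, right]
lemma cond_eq (d v left right : Int) (hd : 0 < d) :
    ((PySem.List.pyRange left (right + 1) 1).any (fun j => decide (d * j = v)))
      = (decide (PySem.Int.mod v d = 0) &&
          (decide (left ≤ PySem.Int.floordiv v d) && decide (PySem.Int.floordiv v d ≤ right))) := by
  rw [Bool.eq_iff_iff]
  simp only [List.any_eq_true, PySem.List.mem_pyRange_one, decide_eq_true_eq,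
    Bool.and_eq_true, PySem.Int.mod_eq_emod_of_pos hd, PySem.Int.floordiv_eq_ediv_of_pos hd]
  constructor
  · rintro ⟨j, ⟨h1, h2⟩, h3⟩
    subst h3
    rw [Int.mul_ediv_cancel_left j (ne_of_gt hd)]
    refine ⟨by simp [Int.mul_emod_right], h1, by omega⟩
  · rintro ⟨h0, h1, h2⟩
    refine ⟨v / d, ⟨h1, by omega⟩, ?_⟩
    have := Int.mul_ediv_add_emod v d
    omega

-- ===== VERDICT (by name: the statement is the Claim_ definition above) =====
theorem solution_spec : Claim_equal_solution := by
  intro numbers left right _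
  unfold Spec_solution solution solution_alt
  rw [outer_fold numbers left right numbers.length (le_refl _)]
  simp only [Nat.sub_self, List.replicate_zero, List.append_nil]
  apply List.ext_getElem
  · simp [PySem.List.length_enumerate]
  · intro k h1 h2
    simp only [List.getElem_map, List.getElem_range, PySem.List.getElem_enumerate]
    have hk : k < numbers.length := by simpa using h2
    unfold condA
    rw [PySem.List.pyGet?_natCast, List.getElem?_eq_getElem hk]
    have hco := cond_eq ((k : Int) + 1) numbers[k] left right (by omega)
    simp only [Option.some.injEq, zero_add]
    exact hco
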